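-- pv_equiv track=rewrite | github.com/BrianHub281437/Wilder-Score | am-i-wilder-yet/app.py | looks_like_java
-- ===== SOURCE A (Python) =====
-- def looks_like_java(code: str) -> bool:
--     java_signals = [
--         "public class",
--         "private class",
--         "protected class",
--         "extends ",
--         "implements ",
--         "super(",
--         "System.out",
--         "public static void main",
--     ]
--     lowered = code.lower()
--     return any(signal.lower() in lowered for signal in java_signals)
-- ===== SOURCE B (Python) =====
-- _JAVA_SIGNALS = (
--     "public class",
--     "private class",
--     "protected class",
--     "extends ",
--     "implements ",
--     "super(",
--     "System.out",
--     "public static void main",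
-- )
--
--
-- def looks_like_java(code: str) -> bool:
--     # One left-to-right pass over the text: at each position test whether any
--     # (lowercased) signal starts there, instead of eight full substring scans.
--     signals = [s.lower() for s in _JAVA_SIGNALS]
--     lowered = code.lower()
--     for i in range(len(lowered)):
--         for sig in signals:
--             if lowered.startswith(sig, i):
--                 return True
--     return False
-- ===== Notes on version B (the rewrite author's own statement) =====
-- stated objective: alternative
-- what changed: Replaces eight independent full-string substring membership scans by a single left-to-right pass over the lowered text that tests at each position whether any signal starts there.
import Mathlib
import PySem

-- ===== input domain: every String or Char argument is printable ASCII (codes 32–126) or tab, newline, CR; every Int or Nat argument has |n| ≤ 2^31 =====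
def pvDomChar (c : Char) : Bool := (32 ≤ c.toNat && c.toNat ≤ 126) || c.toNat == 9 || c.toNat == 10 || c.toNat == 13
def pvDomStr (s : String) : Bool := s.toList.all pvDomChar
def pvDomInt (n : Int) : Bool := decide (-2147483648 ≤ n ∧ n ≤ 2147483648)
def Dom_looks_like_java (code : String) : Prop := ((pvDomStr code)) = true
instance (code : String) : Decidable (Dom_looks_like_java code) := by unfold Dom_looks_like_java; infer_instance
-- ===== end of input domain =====

-- B replaces A's eight independent substring scans by one left-to-right pass
-- testing at each position whether any signal starts there (objective: alternative).

-- ===== PORT A =====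
def pvJavaSignals : List String :=
  ["public class", "private class", "protected class", "extends ",
   "implements ", "super(", "System.out", "public static void main"]

def looks_like_java (code : String) : Bool :=
  let lowered := PySem.Str.lower code
  pvJavaSignals.any (fun signal => PySem.Str.isIn (PySem.Str.lower signal) lowered)

-- ===== PORT B =====
def pvJavaSignalsB : List String :=
  ["public class", "private class", "protected class", "extends ",
   "implements ", "super(", "System.out", "public static void main"]

-- the inner 'for sig in signals: if lowered.startswith(sig, i)' test at one position
def pvStartsAny (sigs : List (List Char)) (cs : List Char) : Bool :=
  sigs.any (fun s => s.isPrefixOf cs)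

-- the outer 'for i in range(len(lowered))' loop, as recursion over the suffixes
def pvScan (sigs : List (List Char)) : List Char → Bool
  | [] => false
  | c :: rest => pvStartsAny sigs (c :: rest) || pvScan sigs rest

def looks_like_java_alt (code : String) : Bool :=
  let signals := pvJavaSignalsB.map (fun s => (PySem.Str.lower s).toList)
  let lowered := (PySem.Str.lower code).toList
  pvScan signals lowered

-- ===== PRECONDITION & SPEC =====
def Spec_looks_like_java (code : String) (out : Bool) : Prop := out = looks_like_java_alt code
instance (code : String) (out : Bool) : Decidable (Spec_looks_like_java code out) := by unfold Spec_looks_like_java; infer_instance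

-- ===== CLAIM (what is proved, stated in full; the proofs are below) =====
def Claim_equal_looks_like_java : Prop := ∀ (code : String), Dom_looks_like_java code → Spec_looks_like_java code (looks_like_java code)

-- ===== LEMMAS AND PROOFS =====

lemma pv_any_or {α : Type} (l : List α) (p q : α → Bool) :
    (l.any fun a => p a || q a) = (l.any p || l.any q) := by
  induction l with
  | nil => rfl
  | cons a t ih =>
    simp only [List.any_cons, ih]
    cases p a <;> cases q a <;> simp

lemma pv_isIn_eq_decide (sub s : List Char) :
    PySem.Chars.isIn sub s = decide (sub <:+: s) := by
  rcases h : PySem.Chars.isIn sub s with _ | _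
  · simp [(PySem.Chars.isIn_eq_false_iff sub s).mp h]
  · simp [(PySem.Chars.isIn_iff_infix sub s).mp h]

lemma pv_scan_eq (sigs : List (List Char)) (h : ∀ s ∈ sigs, s ≠ []) :
    ∀ cs : List Char, pvScan sigs cs = sigs.any (fun s => decide (s <:+: cs)) := by
  intro cs
  induction cs with
  | nil =>
    simp only [pvScan]
    symm
    simp only [List.any_eq_false]
    intro s hs
    simp [List.infix_iff_prefix_suffix, h s hs]
  | cons c rest ih =>
    have hpt : ∀ s : List Char,
        decide (s <:+: c :: rest) = (s.isPrefixOf (c :: rest) || decide (s <:+: rest)) := by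
      intro s
      simp [List.infix_cons_iff, ← List.isPrefixOf_iff_prefix]
    simp only [pvScan, pvStartsAny, ih]
    rw [List.any_congr rfl hpt]
    exact (pv_any_or sigs _ _).symm

-- ===== VERDICT (by name: the statement is the Claim_ definition above) =====
theorem looks_like_java_spec : Claim_equal_looks_like_java := by
  intro code _
  unfold Spec_looks_like_java looks_like_java looks_like_java_alt
  rw [pv_scan_eq]
  · show pvJavaSignals.any _ = (pvJavaSignalsB.map _).any _
    rw [List.any_map]
    refine List.any_congr (by decide) (fun s => ?_)
    simp only [Function.comp]
    rw [PySem.Str.isIn_eq, pv_isIn_eq_decide]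
  · decide
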